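-- pv_equiv track=rewrite | github.com/eazydammy/train-unet | utils/color.py | class2color_idx
-- ===== SOURCE A (Python) =====
-- def class2color_idx(c, x):
--     color_index = []
--     while c != 0:
--         color_index.append(c % x)
--         c = c // x
--     while len(color_index) != 3:
--         color_index.append(0)
--     color_index.reverse()
--     return color_index
-- ===== SOURCE B (Python) =====
-- def class2color_idx(c, x):
--     # Fixed 3-position base-x decomposition, most-significant first:
--     # no digit-extraction loop, no padding loop, no reversal.
--     q = c // x
--     return [q // x % x, q % x, c % x]
-- ===== Notes on version B (the rewrite author's own statement) =====
-- stated objective: simpler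
-- what changed: Replaced the digit-extraction while-loop, pad-to-3 while-loop and list reversal by a direct closed-form 3-digit decomposition built most-significant-first.
-- outside the precondition, e.g. on class2color_idx(0, 0): A returns [0, 0, 0], B raises ZeroDivisionError
import Mathlib
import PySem

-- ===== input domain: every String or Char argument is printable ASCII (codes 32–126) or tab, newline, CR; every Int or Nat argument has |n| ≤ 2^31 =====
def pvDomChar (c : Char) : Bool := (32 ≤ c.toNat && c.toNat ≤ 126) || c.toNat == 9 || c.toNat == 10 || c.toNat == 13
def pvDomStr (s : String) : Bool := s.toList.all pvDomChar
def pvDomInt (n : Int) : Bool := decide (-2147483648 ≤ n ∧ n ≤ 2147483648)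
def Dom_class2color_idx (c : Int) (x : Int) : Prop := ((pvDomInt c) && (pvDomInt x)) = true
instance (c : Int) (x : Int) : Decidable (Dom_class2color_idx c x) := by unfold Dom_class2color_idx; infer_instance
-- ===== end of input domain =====

-- B replaces A's extract/pad/reverse loops by a closed-form 3-digit decomposition (objective: simpler).
-- ===== PORT A =====
-- first while loop: append c % x, set c = c // x, until c = 0; fuel makes the
-- recursion total (inside Pre_ at most 3 iterations happen, so fuel 64 is exact there)
def pvADigits (fuel : Nat) (c : Int) (x : Int) : List Int :=
  match fuel with
  | 0 => []
  | fuel + 1 =>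
    if c ≠ 0 then PySem.Int.mod c x :: pvADigits fuel (PySem.Int.floordiv c x) x
    else []

-- second while loop: append 0 until the length is 3 (fuel for totality; exact inside Pre_)
def pvAPad (fuel : Nat) (l : List Int) : List Int :=
  match fuel with
  | 0 => l
  | fuel + 1 => if l.length ≠ 3 then pvAPad fuel (l ++ [0]) else l

def class2color_idx (c : Int) (x : Int) : List Int :=
  (pvAPad 64 (pvADigits 64 c x)).reverse

-- ===== PORT B =====
def class2color_idx_alt (c : Int) (x : Int) : List Int :=
  let q := PySem.Int.floordiv c x
  [PySem.Int.mod (PySem.Int.floordiv q x) x, PySem.Int.mod q x, PySem.Int.mod c x]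

-- ===== PRECONDITION & SPEC =====
-- Pre_ = exactly the inputs on which Python A returns: x = 0 raises ZeroDivisionError
-- (except at c = 0, where A skips the loop and returns [0,0,0] while B's closed form
-- divides by x: that single accidental value is excluded), and when c//x//x//x ≠ 0 the
-- digit loop yields more than 3 digits (or never reaches 0), so one of A's two while
-- loops runs forever.
def Pre_class2color_idx (c : Int) (x : Int) : Prop :=
  x ≠ 0 ∧ PySem.Int.floordiv (PySem.Int.floordiv (PySem.Int.floordiv c x) x) x = 0
instance (c : Int) (x : Int) : Decidable (Pre_class2color_idx c x) := by unfold Pre_class2color_idx; infer_instance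
def pvWitness_class2color_idx : Int × Int := (255, 7)

def Spec_class2color_idx (c : Int) (x : Int) (out : List Int) : Prop := out = class2color_idx_alt c x
instance (c : Int) (x : Int) (out : List Int) : Decidable (Spec_class2color_idx c x out) := by unfold Spec_class2color_idx; infer_instance

-- ===== CLAIM (what is proved, stated in full; the proofs are below) =====
def Claim_equal_class2color_idx : Prop := ∀ (c : Int) (x : Int), Dom_class2color_idx c x → Pre_class2color_idx c x → Spec_class2color_idx c x (class2color_idx c x)

-- ===== LEMMAS AND PROOFS =====
theorem pv_floordiv_zero (x : Int) : PySem.Int.floordiv 0 x = 0 := by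
  simp [PySem.Int.floordiv]

theorem pv_mod_zero (x : Int) : PySem.Int.mod 0 x = 0 := by
  simp [PySem.Int.mod]

-- ===== VERDICT (by name: the statement is the Claim_ definition above) =====
theorem class2color_idx_spec : Claim_equal_class2color_idx := by
  intro c x _ hpre
  obtain ⟨hx, h3⟩ := hpre
  unfold Spec_class2color_idx class2color_idx class2color_idx_alt
  by_cases h0 : c = 0
  · subst h0
    simp [pvADigits, pvAPad, pv_floordiv_zero, pv_mod_zero]
  · by_cases h1 : PySem.Int.floordiv c x = 0
    · simp [pvADigits, pvAPad, h0, h1, pv_floordiv_zero, pv_mod_zero]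
    · by_cases h2 : PySem.Int.floordiv (PySem.Int.floordiv c x) x = 0
      · simp [pvADigits, pvAPad, h0, h1, h2, pv_mod_zero]
      · simp [pvADigits, pvAPad, h0, h1, h2, h3]
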